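-- pv_equiv track=rewrite | github.com/julio-navarro-lara/thesis_scripts | representing_aasg/cytoscape_to_aasg_v1.py | separate_dict_source_targets
-- ===== SOURCE A (Python) =====
-- def separate_dict_source_targets(dict_source_targets,list_root_nodes):
--
--     separated_dict_source_targets = []
--     for root_node in list_root_nodes:
--         list_sources = [root_node]
--         sub_dict_source_targets = {}
--         while list_sources:
--             source_to_search = list_sources.pop()
--             if source_to_search in dict_source_targets:
--                 list_targets = dict_source_targets[source_to_search]
--                 for target in list_targets:
--                     list_sources.append(target)
--                 sub_dict_source_targets[source_to_search] = dict_source_targets[source_to_search]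
--         separated_dict_source_targets.append(sub_dict_source_targets)
--
--     return separated_dict_source_targets
-- ===== SOURCE B (Python) =====
-- def separate_dict_source_targets(dict_source_targets, list_root_nodes):
--     def reachable_sub_dict(root):
--         sub = {}
--         stack = [root]
--         while stack:
--             node = stack.pop()
--             if node in sub:
--                 continue
--             targets = dict_source_targets.get(node)
--             if targets is not None:
--                 sub[node] = targets
--                 stack.extend(targets)
--         return sub
--
--     return [reachable_sub_dict(root) for root in list_root_nodes]
-- ===== Notes on version B (the rewrite author's own statement) =====
-- stated objective: alternative
-- what changed: B marks nodes as visited (membership in the growing sub-dict) and skips them at pop, so each node is expanded at most once per root, instead of A's re-expansion of every re-pushed node (which diverges on reachable cycles); on the random timing inputs the two run at the same speed.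
import Mathlib
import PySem

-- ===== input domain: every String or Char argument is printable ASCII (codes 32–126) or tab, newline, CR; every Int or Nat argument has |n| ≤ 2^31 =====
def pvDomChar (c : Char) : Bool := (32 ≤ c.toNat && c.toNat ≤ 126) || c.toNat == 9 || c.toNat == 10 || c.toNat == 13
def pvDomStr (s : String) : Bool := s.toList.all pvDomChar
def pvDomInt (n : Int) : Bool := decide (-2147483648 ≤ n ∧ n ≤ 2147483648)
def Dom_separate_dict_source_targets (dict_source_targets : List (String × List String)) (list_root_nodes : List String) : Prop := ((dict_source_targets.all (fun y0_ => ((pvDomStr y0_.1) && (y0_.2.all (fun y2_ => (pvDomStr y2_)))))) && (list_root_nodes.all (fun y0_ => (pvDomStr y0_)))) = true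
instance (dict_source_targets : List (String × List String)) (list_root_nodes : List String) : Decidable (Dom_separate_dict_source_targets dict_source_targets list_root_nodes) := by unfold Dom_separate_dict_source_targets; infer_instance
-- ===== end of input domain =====

-- B changes the algorithm: a visited check (membership in the sub-dict) skips already-expanded
-- nodes, one expansion per node per root, instead of A's unbounded re-expansion.
-- ===== PORT A =====
-- total number of target entries (used to size A's termination fuel and the closure iteration count)
def pvTotTargets (dst : List (String × List String)) : Nat :=
  (dst.map (fun e => e.2.length)).sum

-- the while loop of A: pop from the stack; if the node is a dict key, push all its targets and
-- record the entry.  Fuel makes the (on reachable cycles divergent) loop total; none = fuel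
-- exhausted, which Pre_ rules out.
def pvLoopA (base : PySem.Dict String (List String)) :
    Nat → List String → PySem.Dict String (List String) →
    Option (PySem.Dict String (List String))
  | 0, _, _ => none
  | _ + 1, [], sub => some sub
  | f + 1, v :: st, sub =>
    match base.get? v with
    | some ts => pvLoopA base f (ts.foldl (fun s t => t :: s) st) (sub.insert v ts)
    | none => pvLoopA base f st sub

-- fuel bound: enough iterations for every input Pre_ admits (proved below)
def pvFuelA (dst : List (String × List String)) : Nat :=
  (pvTotTargets dst + 2) ^ (pvTotTargets dst + 3)

def separate_dict_source_targets (dict_source_targets : List (String × List String)) (list_root_nodes : List String) : List (List (String × List String)) :=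
  let base : PySem.Dict String (List String) := PySem.Dict.mk dict_source_targets
  list_root_nodes.foldl
    (fun acc root_node =>
      acc ++ [((pvLoopA base (pvFuelA dict_source_targets) [root_node] PySem.Dict.empty).getD PySem.Dict.empty).items])
    []

-- ===== PORT B =====
-- pushing a target list = prepending its reverse (used by pvReachAlt's termination measure)
theorem pvPush_eq (ts st : List String) :
    ts.foldl (fun s t => t :: s) st = ts.reverse ++ st := by
  induction ts generalizing st with
  | nil => simp
  | cons x xs ih => simp [ih, List.append_assoc]

-- helper fact needed by pvReachAlt's termination measure (and the fuel bound for A)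
theorem pvTargets_le_tot (base : PySem.Dict String (List String)) (v : String)
    (ts : List String) (h : base.get? v = some ts) :
    ts.length ≤ pvTotTargets base.items := by
  unfold PySem.Dict.get? at h
  obtain ⟨p, hp, hsnd⟩ := Option.map_eq_some_iff.mp h
  have hmem := List.mem_of_find?_eq_some hp
  subst hsnd
  unfold pvTotTargets
  exact List.single_le_sum (by simp) _ (List.mem_map_of_mem hmem)

-- number of dict keys not yet recorded in sub
def pvCountU (base : PySem.Dict String (List String))
    (sub : PySem.Dict String (List String)) : Nat :=
  ((PySem.List.dedup base.keys).filter (fun k => !(sub.contains k))).length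

theorem pvFilter_length_mono {α : Type} (l : List α) (p q : α → Bool)
    (himp : ∀ x ∈ l, q x = true → p x = true) :
    (l.filter q).length ≤ (l.filter p).length := by
  induction l with
  | nil => simp
  | cons x xs ih =>
    have h1 := ih (fun y hy => himp y (List.mem_cons_of_mem _ hy))
    simp only [List.filter_cons]
    by_cases hqx : q x = true
    · have hpx := himp x List.mem_cons_self hqx
      simp only [hqx, hpx, if_pos, List.length_cons]; omega
    · simp only [Bool.not_eq_true] at hqx
      simp only [hqx, Bool.false_eq_true, if_false]
      by_cases hpx : p x = true
      · simp only [hpx, if_pos, List.length_cons]; omega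
      · simp only [Bool.not_eq_true] at hpx
        simp only [hpx, Bool.false_eq_true, if_false]; omega

theorem pvFilter_length_lt {α : Type} (l : List α) (p q : α → Bool)
    (himp : ∀ x ∈ l, q x = true → p x = true) (a : α) (ha : a ∈ l)
    (hpa : p a = true) (hqa : q a = false) :
    (l.filter q).length < (l.filter p).length := by
  induction l with
  | nil => cases ha
  | cons x xs ih =>
    rcases List.mem_cons.mp ha with rfl | hmem
    · have h1 : (xs.filter q).length ≤ (xs.filter p).length :=
        pvFilter_length_mono xs p q (fun y hy => himp y (List.mem_cons_of_mem _ hy))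
      simp only [List.filter_cons, hpa, hqa, if_pos, Bool.false_eq_true, if_false,
        List.length_cons]
      omega
    · have h1 : (xs.filter q).length < (xs.filter p).length :=
        ih (fun y hy => himp y (List.mem_cons_of_mem _ hy)) hmem
      simp only [List.filter_cons]
      by_cases hqx : q x = true
      · have hpx : p x = true := himp x List.mem_cons_self hqx
        simp only [hqx, hpx, if_pos, List.length_cons]; omega
      · simp only [Bool.not_eq_true] at hqx
        simp only [hqx, Bool.false_eq_true, if_false]
        by_cases hpx : p x = true
        · simp only [hpx, if_pos, List.length_cons]; omega
        · simp only [Bool.not_eq_true] at hpx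
          simp only [hpx, Bool.false_eq_true, if_false]; omega

theorem pvCountU_insert_lt (base sub : PySem.Dict String (List String))
    (v : String) (ts : List String) (hget : base.get? v = some ts)
    (hnc : sub.contains v = false) :
    pvCountU base (sub.insert v ts) < pvCountU base sub := by
  unfold pvCountU
  refine pvFilter_length_lt _ _ _ ?_ v ?_ ?_ ?_
  · intro x hx hq
    simp only [Bool.not_eq_true', PySem.Dict.contains_insert, Bool.or_eq_false_iff] at hq
    simp [hq.2]
  · have hb : base.contains v = true := by
      rw [PySem.Dict.contains_eq_isSome_get?, hget]; rfl
    unfold PySem.Dict.contains at hb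
    rw [List.any_eq_true] at hb
    obtain ⟨p, hp, hpe⟩ := hb
    have hv : v ∈ base.keys := by
      have := beq_iff_eq.mp hpe
      exact this ▸ List.mem_map_of_mem hp
    simpa [PySem.List.mem_dedup] using hv
  · simp [hnc]
  · simp

-- the while loop of B: pop; skip if already recorded; otherwise record and push targets.
-- Terminates unconditionally: each non-skip step records a new dict key.
def pvReachAlt (base : PySem.Dict String (List String)) :
    List String → PySem.Dict String (List String) → PySem.Dict String (List String)
  | [], sub => sub
  | v :: st, sub =>
    if h1 : sub.contains v then pvReachAlt base st sub
    else
      match h2 : base.get? v with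
      | some ts => pvReachAlt base (ts.foldl (fun s t => t :: s) st) (sub.insert v ts)
      | none => pvReachAlt base st sub
termination_by st sub => pvCountU base sub * (pvTotTargets base.items + 1) + st.length
decreasing_by
  · simp only [List.length_cons]; omega
  · have hlen : ts.length ≤ pvTotTargets base.items := pvTargets_le_tot base v ts h2
    have hcu : pvCountU base (sub.insert v ts) + 1 ≤ pvCountU base sub :=
      pvCountU_insert_lt base sub v ts h2 (by simpa using h1)
    have hstack : (ts.foldl (fun s t => t :: s) st).length = ts.length + st.length := by
      rw [pvPush_eq]; simp
    have hmul : (pvCountU base (sub.insert v ts) + 1) * (pvTotTargets base.items + 1)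
        ≤ pvCountU base sub * (pvTotTargets base.items + 1) :=
      Nat.mul_le_mul_right _ hcu
    have hexp : (pvCountU base (sub.insert v ts) + 1) * (pvTotTargets base.items + 1)
        = pvCountU base (sub.insert v ts) * (pvTotTargets base.items + 1)
          + (pvTotTargets base.items + 1) := by ring
    simp only [List.length_cons]
    omega
  · simp only [List.length_cons]; omega

def separate_dict_source_targets_alt (dict_source_targets : List (String × List String)) (list_root_nodes : List String) : List (List (String × List String)) :=
  let base : PySem.Dict String (List String) := PySem.Dict.mk dict_source_targets
  list_root_nodes.map (fun root_node => (pvReachAlt base [root_node] PySem.Dict.empty).items)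

-- ===== PRECONDITION & SPEC =====
-- reachability closure of a start set in the dict's key graph (used by Pre_):
-- iterate 'add all targets of members' with dedup until it must have stabilised
def pvTg (base : PySem.Dict String (List String)) (v : String) : List String :=
  (base.get? v).getD []

def pvStepS (base : PySem.Dict String (List String)) (S : List String) : List String :=
  PySem.List.dedup (S ++ S.flatMap (fun v => pvTg base v))

def pvClos (base : PySem.Dict String (List String)) : Nat → List String → List String
  | 0, S => S
  | n + 1, S => pvStepS base (pvClos base n S)

def pvReachB (base : PySem.Dict String (List String)) (S : List String) : List String :=
  pvClos base (S.length + pvTotTargets base.items + 1) S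

-- Pre_ excludes exactly the inputs on which A's while loop never returns: dicts in which a key
-- cycle is reachable from some root node (A re-pushes the targets of every popped key, so the
-- stack never empties there); under Pre_ A's loop is proved total below (fuel adequacy).
def Pre_separate_dict_source_targets (dict_source_targets : List (String × List String)) (list_root_nodes : List String) : Prop :=
  ∀ v ∈ pvReachB (PySem.Dict.mk dict_source_targets) list_root_nodes,
    ∀ t ∈ pvTg (PySem.Dict.mk dict_source_targets) v,
      v ∉ pvReachB (PySem.Dict.mk dict_source_targets) [t]

instance (dict_source_targets : List (String × List String)) (list_root_nodes : List String) : Decidable (Pre_separate_dict_source_targets dict_source_targets list_root_nodes) := by unfold Pre_separate_dict_source_targets; infer_instance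

def pvWitness_separate_dict_source_targets : (List (String × List String)) × List String :=
  ([("a", ["b", "c"]), ("b", ["c"]), ("c", [])], ["a", "c", "z"])

def Spec_separate_dict_source_targets (dict_source_targets : List (String × List String)) (list_root_nodes : List String) (out : List (List (String × List String))) : Prop := out = separate_dict_source_targets_alt dict_source_targets list_root_nodes
instance (dict_source_targets : List (String × List String)) (list_root_nodes : List String) (out : List (List (String × List String))) : Decidable (Spec_separate_dict_source_targets dict_source_targets list_root_nodes out) := by unfold Spec_separate_dict_source_targets; infer_instance

-- ===== CLAIM (what is proved, stated in full; the proofs are below) =====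
def Claim_equal_separate_dict_source_targets : Prop := ∀ (dict_source_targets : List (String × List String)) (list_root_nodes : List String), Dom_separate_dict_source_targets dict_source_targets list_root_nodes → Pre_separate_dict_source_targets dict_source_targets list_root_nodes → Spec_separate_dict_source_targets dict_source_targets list_root_nodes (separate_dict_source_targets dict_source_targets list_root_nodes)

-- ===== LEMMAS AND PROOFS =====

-- unfolding equations for pvReachAlt (its definition is by well-founded recursion)
theorem pvReachAlt_nil (base : PySem.Dict String (List String))
    (sub : PySem.Dict String (List String)) : pvReachAlt base [] sub = sub := by
  rw [pvReachAlt]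

theorem pvReachAlt_cons_visited (base : PySem.Dict String (List String)) (v : String)
    (st : List String) (sub : PySem.Dict String (List String))
    (hc : sub.contains v = true) :
    pvReachAlt base (v :: st) sub = pvReachAlt base st sub := by
  rw [pvReachAlt, dif_pos hc]

theorem pvReachAlt_cons_none (base : PySem.Dict String (List String)) (v : String)
    (st : List String) (sub : PySem.Dict String (List String))
    (hc : sub.contains v = false) (hget : base.get? v = none) :
    pvReachAlt base (v :: st) sub = pvReachAlt base st sub := by
  rw [pvReachAlt, dif_neg (by simp [hc])]
  split
  · next ts h2 => rw [hget] at h2; cases h2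
  · rfl

theorem pvReachAlt_cons_some (base : PySem.Dict String (List String)) (v : String)
    (ts : List String) (st : List String) (sub : PySem.Dict String (List String))
    (hc : sub.contains v = false) (hget : base.get? v = some ts) :
    pvReachAlt base (v :: st) sub
      = pvReachAlt base (ts.reverse ++ st) (sub.insert v ts) := by
  rw [pvReachAlt, dif_neg (by simp [hc])]
  split
  · next ts' h2 =>
    rw [hget] at h2
    obtain rfl := Option.some.inj h2
    rw [pvPush_eq]
  · next h2 => rw [hget] at h2; cases h2

-- ----- the reachability closure: basic membership facts -----
theorem pvMem_stepS (base : PySem.Dict String (List String)) (S : List String) (x : String) :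
    x ∈ pvStepS base S ↔ (x ∈ S ∨ ∃ v ∈ S, x ∈ pvTg base v) := by
  simp [pvStepS, List.mem_append, List.mem_flatMap]

theorem pvClos_succ_mem (base : PySem.Dict String (List String)) (S : List String)
    (n : Nat) (x : String) (hx : x ∈ pvClos base n S) : x ∈ pvClos base (n + 1) S := by
  show x ∈ pvStepS base (pvClos base n S)
  rw [pvMem_stepS]
  exact Or.inl hx

theorem pvClos_mono_mem (base : PySem.Dict String (List String)) (S : List String)
    {n m : Nat} (h : n ≤ m) (x : String) (hx : x ∈ pvClos base n S) :
    x ∈ pvClos base m S := by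
  induction h with
  | refl => exact hx
  | step _ ih => exact pvClos_succ_mem base S _ x ih

theorem pvSelf_mem_clos (base : PySem.Dict String (List String)) (S : List String)
    (n : Nat) (x : String) (hx : x ∈ S) : x ∈ pvClos base n S :=
  pvClos_mono_mem base S (Nat.zero_le n) x hx

theorem pvClos_least (base : PySem.Dict String (List String)) (S : List String)
    (T : String → Prop) (hS : ∀ x ∈ S, T x)
    (hcl : ∀ v, T v → ∀ t ∈ pvTg base v, T t) :
    ∀ n x, x ∈ pvClos base n S → T x := by
  intro n
  induction n with
  | zero => exact hS
  | succ k ih =>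
    intro x hx
    rw [show pvClos base (k + 1) S = pvStepS base (pvClos base k S) from rfl,
      pvMem_stepS] at hx
    rcases hx with hx | ⟨v, hv, ht⟩
    · exact ih x hx
    · exact hcl v (ih v hv) x ht

-- every element of the closure lies in the start set or among the dict's targets
def pvAllT (base : PySem.Dict String (List String)) : List String :=
  base.items.flatMap (fun e => e.2)

theorem pvTg_sub_allT (base : PySem.Dict String (List String)) (v t : String)
    (ht : t ∈ pvTg base v) : t ∈ pvAllT base := by
  unfold pvTg at ht
  cases hget : base.get? v with
  | none => rw [hget] at ht; simp at ht
  | some ts =>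
    rw [hget] at ht
    simp only [Option.getD_some] at ht
    have hmem := PySem.Dict.mem_items_of_get?_eq_some base hget
    exact List.mem_flatMap.mpr ⟨(v, ts), hmem, ht⟩

theorem pvClos_sub_univ (base : PySem.Dict String (List String)) (S : List String) :
    ∀ n x, x ∈ pvClos base n S → x ∈ S ∨ x ∈ pvAllT base :=
  pvClos_least base S (fun x => x ∈ S ∨ x ∈ pvAllT base) (fun x hx => Or.inl hx)
    (fun v _ t ht => Or.inr (pvTg_sub_allT base v t ht))

-- one closure step is extensional in membership
theorem pvStep_ext (base : PySem.Dict String (List String)) {A B : List String}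
    (h : ∀ x, x ∈ A ↔ x ∈ B) : ∀ x, x ∈ pvStepS base A ↔ x ∈ pvStepS base B := by
  intro x
  rw [pvMem_stepS, pvMem_stepS]
  constructor
  · rintro (hx | ⟨v, hv, ht⟩)
    · exact Or.inl ((h x).mp hx)
    · exact Or.inr ⟨v, (h v).mp hv, ht⟩
  · rintro (hx | ⟨v, hv, ht⟩)
    · exact Or.inl ((h x).mpr hx)
    · exact Or.inr ⟨v, (h v).mpr hv, ht⟩

-- the closure either stabilises before n or has gained n fresh elements
theorem pvClos_grow (base : PySem.Dict String (List String)) (S : List String) :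
    ∀ n, (∃ m, m < n ∧ ∀ x, x ∈ pvClos base (m + 1) S ↔ x ∈ pvClos base m S) ∨
      S.toFinset.card + n ≤ (pvClos base n S).toFinset.card := by
  intro n
  induction n with
  | zero => right; simp [pvClos]
  | succ k ih =>
    rcases ih with ⟨m, hm, hst⟩ | hcard
    · exact Or.inl ⟨m, Nat.lt_succ_of_lt hm, hst⟩
    · by_cases hstab : ∀ x, x ∈ pvClos base (k + 1) S ↔ x ∈ pvClos base k S
      · exact Or.inl ⟨k, Nat.lt_succ_self k, hstab⟩
      · right
        obtain ⟨x, hx⟩ := not_forall.mp hstab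
        have hx1 : x ∈ pvClos base (k + 1) S ∧ x ∉ pvClos base k S := by
          by_cases h1 : x ∈ pvClos base k S
          · exact absurd (iff_of_true (pvClos_succ_mem base S k x h1) h1) hx
          · refine ⟨?_, h1⟩
            by_contra h2
            exact hx (iff_of_false h2 h1)
        have hsub : (pvClos base k S).toFinset ⊆ (pvClos base (k + 1) S).toFinset := by
          intro y hy
          rw [List.mem_toFinset] at *
          exact pvClos_succ_mem base S k y hy
        have hss : (pvClos base k S).toFinset ⊂ (pvClos base (k + 1) S).toFinset := by
          refine ⟨hsub, fun hcon => ?_⟩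
          exact hx1.2 (List.mem_toFinset.mp (hcon (List.mem_toFinset.mpr hx1.1)))
        have := Finset.card_lt_card hss
        omega

theorem pvStable_exists (base : PySem.Dict String (List String)) (S : List String) :
    ∃ m, m < S.length + pvTotTargets base.items + 1 ∧
      ∀ x, x ∈ pvClos base (m + 1) S ↔ x ∈ pvClos base m S := by
  rcases pvClos_grow base S (S.length + pvTotTargets base.items + 1) with h | hcard
  · exact h
  · exfalso
    have hsub : (pvClos base (S.length + pvTotTargets base.items + 1) S).toFinset
        ⊆ (S ++ pvAllT base).toFinset := by
      intro x hx
      rw [List.mem_toFinset] at *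
      rcases pvClos_sub_univ base S _ x hx with h | h
      · exact List.mem_append_left _ h
      · exact List.mem_append_right _ h
    have h1 := Finset.card_le_card hsub
    have h2 : (S ++ pvAllT base).toFinset.card ≤ (S ++ pvAllT base).length :=
      List.toFinset_card_le _
    have h3 : (S ++ pvAllT base).length = S.length + pvTotTargets base.items := by
      simp [pvAllT, List.length_flatMap, pvTotTargets]
    omega

theorem pvStable_from (base : PySem.Dict String (List String)) (S : List String) (m : Nat)
    (hm : ∀ x, x ∈ pvClos base (m + 1) S ↔ x ∈ pvClos base m S) :
    ∀ k x, x ∈ pvClos base (m + k) S ↔ x ∈ pvClos base m S := by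
  intro k
  induction k with
  | zero => simp
  | succ j ih =>
    intro x
    rw [show pvClos base (m + (j + 1)) S = pvStepS base (pvClos base (m + j) S) from rfl]
    calc x ∈ pvStepS base (pvClos base (m + j) S)
        ↔ x ∈ pvStepS base (pvClos base m S) := pvStep_ext base ih x
      _ ↔ x ∈ pvClos base m S := hm x

-- the computed closure is closed under the edge relation
theorem pvReachB_closed (base : PySem.Dict String (List String)) (S : List String) :
    ∀ v ∈ pvReachB base S, ∀ t ∈ pvTg base v, t ∈ pvReachB base S := by
  intro v hv t ht
  obtain ⟨m, hmK, hstab⟩ := pvStable_exists base S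
  unfold pvReachB at hv ⊢
  have ht1 : t ∈ pvClos base (S.length + pvTotTargets base.items + 1 + 1) S := by
    show t ∈ pvStepS base (pvClos base (S.length + pvTotTargets base.items + 1) S)
    rw [pvMem_stepS]
    exact Or.inr ⟨v, hv, ht⟩
  have e1 := pvStable_from base S m hstab (S.length + pvTotTargets base.items + 1 + 1 - m)
  rw [Nat.add_sub_cancel' (by omega)] at e1
  have e2 := pvStable_from base S m hstab (S.length + pvTotTargets base.items + 1 - m)
  rw [Nat.add_sub_cancel' (by omega)] at e2
  exact (e2 t).mpr ((e1 t).mp ht1)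

-- ----- the rank: number of distinct nodes reachable from a node -----
def pvRk (base : PySem.Dict String (List String)) (v : String) : Nat :=
  (pvReachB base [v]).toFinset.card

theorem pvRk_pos (base : PySem.Dict String (List String)) (v : String) :
    1 ≤ pvRk base v := by
  have hv : v ∈ pvReachB base [v] :=
    pvSelf_mem_clos base [v] _ v (List.mem_singleton_self v)
  exact Finset.card_pos.mpr ⟨v, List.mem_toFinset.mpr hv⟩

theorem pvRk_le (base : PySem.Dict String (List String)) (v : String) :
    pvRk base v ≤ pvTotTargets base.items + 1 := by
  unfold pvRk
  have hsub : (pvReachB base [v]).toFinset ⊆ ([v] ++ pvAllT base).toFinset := by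
    intro x hx
    rw [List.mem_toFinset] at *
    rcases pvClos_sub_univ base [v] _ x hx with h | h
    · exact List.mem_append_left _ h
    · exact List.mem_append_right _ h
  have h1 := Finset.card_le_card hsub
  have h2 : ([v] ++ pvAllT base).toFinset.card ≤ ([v] ++ pvAllT base).length :=
    List.toFinset_card_le _
  have h3 : ([v] ++ pvAllT base).length = pvTotTargets base.items + 1 := by
    simp [pvAllT, List.length_flatMap, pvTotTargets]
  omega

-- the central order fact: along an edge out of a node that lies on no cycle, rank strictly drops
theorem pvRk_edge (base : PySem.Dict String (List String)) (t v : String)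
    (ht : t ∈ pvTg base v) (hnc : v ∉ pvReachB base [t]) :
    pvRk base t < pvRk base v := by
  have hvv : v ∈ pvReachB base [v] :=
    pvSelf_mem_clos base [v] _ v (List.mem_singleton_self v)
  have htv : t ∈ pvReachB base [v] := pvReachB_closed base [v] v hvv t ht
  have hsub : ∀ x ∈ pvReachB base [t], x ∈ pvReachB base [v] := by
    intro x hx
    refine pvClos_least base [t] (fun y => y ∈ pvReachB base [v]) ?_ ?_ _ x hx
    · intro y hy
      rw [List.mem_singleton] at hy
      exact hy ▸ htv
    · intro w hw s hs
      exact pvReachB_closed base [v] w hw s hs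
  have hsubF : (pvReachB base [t]).toFinset ⊆ (pvReachB base [v]).toFinset := by
    intro x hx
    rw [List.mem_toFinset] at *
    exact hsub x hx
  apply Finset.card_lt_card
  rw [Finset.ssubset_iff_of_subset hsubF]
  exact ⟨v, List.mem_toFinset.mpr hvv, fun hcon => hnc (List.mem_toFinset.mp hcon)⟩

-- ----- the invariant carried through A's loop -----
-- G is the set of nodes reachable from the roots (everything that can appear on the stack);
-- rk is any rank that strictly drops along edges out of G-nodes.
def pvAgree (base sub : PySem.Dict String (List String)) : Prop :=
  ∀ k ts, sub.get? k = some ts → base.get? k = some ts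

def pvRINV (rk : String → Nat) (base sub : PySem.Dict String (List String))
    (st : List String) : Prop :=
  ∀ k ts t, sub.get? k = some ts → t ∈ ts → base.contains t = true →
    sub.contains t = false →
    ∃ pre suf, st = pre ++ t :: suf ∧ ∀ x ∈ pre, rk x < rk k

def pvINV (G : String → Prop) (rk : String → Nat)
    (base sub : PySem.Dict String (List String)) (st : List String) : Prop :=
  sub.keys.Nodup ∧ pvAgree base sub ∧ (∀ x ∈ st, G x) ∧ pvRINV rk base sub st

theorem pvContains_of_get? (d : PySem.Dict String (List String)) (v : String)
    (ts : List String) (h : d.get? v = some ts) : d.contains v = true := by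
  rw [PySem.Dict.contains_eq_isSome_get?, h]; rfl

theorem pvGet?_of_contains (d : PySem.Dict String (List String)) (v : String)
    (h : d.contains v = true) : ∃ ts, d.get? v = some ts := by
  rw [PySem.Dict.contains_eq_isSome_get?] at h
  exact Option.isSome_iff_exists.mp h

theorem pvTg_eq_of_get? (base : PySem.Dict String (List String)) (v : String)
    (ts : List String) (h : base.get? v = some ts) : pvTg base v = ts := by
  simp [pvTg, h]

-- re-inserting the value already stored is a no-op
theorem pvInsert_self (sub : PySem.Dict String (List String)) (v : String)
    (ts : List String) (hnd : sub.keys.Nodup) (h : sub.get? v = some ts) :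
    sub.insert v ts = sub := by
  apply PySem.Dict.ext
  rw [PySem.Dict.items_insert_of_contains _ _ (pvContains_of_get? _ _ _ h)]
  conv_rhs => rw [← List.map_id sub.items]
  apply List.map_congr_left
  intro p hp
  by_cases hpv : p.1 = v
  · have hg := PySem.Dict.get?_of_mem_items sub (k := p.1) (v := p.2) (by simpa using hp) hnd
    rw [hpv, h] at hg
    have hts : p.2 = ts := (Option.some.inj hg).symm
    simp only [id, hpv, beq_self_eq_true, if_pos]
    rw [← hpv, ← hts]
  · simp [id, hpv]

-- case v not a key: the invariant descends to the popped stack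
theorem pvRINV_pop_none (rk : String → Nat)
    (base sub : PySem.Dict String (List String)) (v : String) (st : List String)
    (hget : base.get? v = none) (hR : pvRINV rk base sub (v :: st)) :
    pvRINV rk base sub st := by
  intro k ts t hk ht hbt hst
  obtain ⟨pre, suf, hdec, hrk⟩ := hR k ts t hk ht hbt hst
  cases pre with
  | nil =>
    simp only [List.nil_append, List.cons.injEq] at hdec
    rw [← hdec.1] at hbt
    rw [PySem.Dict.contains_eq_isSome_get?, hget] at hbt
    cases hbt
  | cons y pre' =>
    simp only [List.cons_append, List.cons.injEq] at hdec
    exact ⟨pre', suf, hdec.2, fun x hx => hrk x (List.mem_cons_of_mem _ hx)⟩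

-- case v fresh key: invariant transported to the pushed stack and extended dict
theorem pvINV_push_fresh (G : String → Prop) (rk : String → Nat)
    (base sub : PySem.Dict String (List String)) (v : String) (ts : List String)
    (st : List String)
    (hGcl : ∀ w, G w → ∀ t ∈ pvTg base w, G t)
    (hEdge : ∀ w, G w → ∀ t ∈ pvTg base w, rk t < rk w)
    (hget : base.get? v = some ts) (hnc : sub.contains v = false)
    (hI : pvINV G rk base sub (v :: st)) :
    pvINV G rk base (sub.insert v ts) (ts.reverse ++ st) := by
  obtain ⟨hnd, hA, hG, hR⟩ := hI
  have hGv : G v := hG v List.mem_cons_self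
  have htg := pvTg_eq_of_get? base v ts hget
  have hedge : ∀ t ∈ ts, rk t < rk v := fun t ht => hEdge v hGv t (htg ▸ ht)
  refine ⟨PySem.Dict.nodup_keys_insert _ _ _ hnd, ?_, ?_, ?_⟩
  · intro k w hk
    rw [PySem.Dict.get?_insert] at hk
    by_cases hkv : k = v
    · subst hkv
      rw [if_pos rfl] at hk
      rw [← Option.some.inj hk]; exact hget
    · rw [if_neg hkv] at hk
      exact hA k w hk
  · intro x hx
    rcases List.mem_append.mp hx with hx1 | hx2
    · exact hGcl v hGv x (htg ▸ List.mem_reverse.mp hx1)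
    · exact hG x (List.mem_cons_of_mem _ hx2)
  · intro k w t hk ht hbt hst
    have htv : t ≠ v := by
      intro hc; subst hc
      simp at hst
    have hsubt : sub.contains t = false := by
      have := hst
      simp only [PySem.Dict.contains_insert, Bool.or_eq_false_iff] at this
      exact this.2
    rw [PySem.Dict.get?_insert] at hk
    by_cases hkv : k = v
    · subst hkv
      rw [if_pos rfl] at hk
      obtain rfl := Option.some.inj hk
      obtain ⟨pre, suf, hdec⟩ := List.append_of_mem (List.mem_reverse.mpr ht)
      refine ⟨pre, suf ++ st, by rw [hdec]; simp, ?_⟩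
      intro x hx
      have hxts : x ∈ ts := by
        have : x ∈ ts.reverse := by rw [hdec]; exact List.mem_append_left _ hx
        exact List.mem_reverse.mp this
      exact hedge x hxts
    · rw [if_neg hkv] at hk
      obtain ⟨pre, suf, hdec, hrk⟩ := hR k w t hk ht hbt hsubt
      cases pre with
      | nil =>
        simp only [List.nil_append, List.cons.injEq] at hdec
        exact absurd hdec.1.symm htv
      | cons y pre' =>
        simp only [List.cons_append, List.cons.injEq] at hdec
        obtain ⟨rfl, hdec2⟩ := hdec
        have hrv : rk v < rk k := hrk v List.mem_cons_self
        refine ⟨ts.reverse ++ pre', suf, by rw [hdec2]; simp, ?_⟩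
        intro x hx
        rcases List.mem_append.mp hx with hx1 | hx2
        · exact lt_trans (hedge x (List.mem_reverse.mp hx1)) hrv
        · exact hrk x (List.mem_cons_of_mem _ hx2)

-- case v already-recorded key: invariant transported to the re-pushed stack (dict unchanged)
theorem pvINV_push_visited (G : String → Prop) (rk : String → Nat)
    (base sub : PySem.Dict String (List String)) (v : String) (ts : List String)
    (st : List String)
    (hGcl : ∀ w, G w → ∀ t ∈ pvTg base w, G t)
    (hEdge : ∀ w, G w → ∀ t ∈ pvTg base w, rk t < rk w)
    (hget : base.get? v = some ts) (hc : sub.contains v = true)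
    (hI : pvINV G rk base sub (v :: st)) :
    pvINV G rk base sub (ts.reverse ++ st) := by
  obtain ⟨hnd, hA, hG, hR⟩ := hI
  have hGv : G v := hG v List.mem_cons_self
  have htg := pvTg_eq_of_get? base v ts hget
  have hedge : ∀ t ∈ ts, rk t < rk v := fun t ht => hEdge v hGv t (htg ▸ ht)
  refine ⟨hnd, hA, ?_, ?_⟩
  · intro x hx
    rcases List.mem_append.mp hx with hx1 | hx2
    · exact hGcl v hGv x (htg ▸ List.mem_reverse.mp hx1)
    · exact hG x (List.mem_cons_of_mem _ hx2)
  · intro k w t hk ht hbt hst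
    have htv : t ≠ v := fun hcon => by rw [hcon] at hst; rw [hst] at hc; cases hc
    obtain ⟨pre, suf, hdec, hrk⟩ := hR k w t hk ht hbt hst
    cases pre with
    | nil =>
      simp only [List.nil_append, List.cons.injEq] at hdec
      exact absurd hdec.1.symm htv
    | cons y pre' =>
      simp only [List.cons_append, List.cons.injEq] at hdec
      obtain ⟨rfl, hdec2⟩ := hdec
      have hrv : rk v < rk k := hrk v List.mem_cons_self
      refine ⟨ts.reverse ++ pre', suf, by rw [hdec2]; simp, ?_⟩
      intro x hx
      rcases List.mem_append.mp hx with hx1 | hx2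
      · exact lt_trans (hedge x (List.mem_reverse.mp hx1)) hrv
      · exact hrk x (List.mem_cons_of_mem _ hx2)

-- at a pop of an already-recorded node, all its key-targets are already recorded
theorem pvClosure_at_pop (rk : String → Nat)
    (base sub : PySem.Dict String (List String)) (v : String) (ts : List String)
    (st : List String)
    (hget : sub.get? v = some ts) (hR : pvRINV rk base sub (v :: st)) :
    ∀ t ∈ ts, base.contains t = true → sub.contains t = true := by
  intro t ht hbt
  by_contra hc
  simp only [Bool.not_eq_true] at hc
  obtain ⟨pre, suf, hdec, hrk⟩ := hR v ts t hget ht hbt hc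
  cases pre with
  | nil =>
    simp only [List.nil_append, List.cons.injEq] at hdec
    rw [← hdec.1] at hc
    rw [pvContains_of_get? _ _ _ hget] at hc
    cases hc
  | cons y pre' =>
    simp only [List.cons_append, List.cons.injEq] at hdec
    obtain ⟨rfl, _⟩ := hdec
    exact absurd (hrk v List.mem_cons_self) (lt_irrefl _)

-- B's loop skips a prefix whose key-elements are all recorded
theorem pvReachAlt_skip (base : PySem.Dict String (List String))
    (X : List String) (st : List String) (sub : PySem.Dict String (List String))
    (hX : ∀ x ∈ X, base.contains x = true → sub.contains x = true) :
    pvReachAlt base (X ++ st) sub = pvReachAlt base st sub := by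
  induction X with
  | nil => rfl
  | cons x X' ih =>
    rw [List.cons_append]
    by_cases hc : sub.contains x = true
    · rw [pvReachAlt_cons_visited base x _ sub hc]
      exact ih (fun y hy => hX y (List.mem_cons_of_mem _ hy))
    · cases hget : base.get? x with
      | none =>
        rw [pvReachAlt_cons_none base x _ sub (by simpa using hc) hget]
        exact ih (fun y hy => hX y (List.mem_cons_of_mem _ hy))
      | some ts =>
        exact absurd (hX x List.mem_cons_self (pvContains_of_get? _ _ _ hget)) hc

-- correctness: whenever A's loop completes, it computes exactly B's loop's value
theorem pvCorr (base : PySem.Dict String (List String))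
    (G : String → Prop) (rk : String → Nat)
    (hGcl : ∀ w, G w → ∀ t ∈ pvTg base w, G t)
    (hEdge : ∀ w, G w → ∀ t ∈ pvTg base w, rk t < rk w) :
    ∀ (f : Nat) (st : List String) (sub : PySem.Dict String (List String))
      (r : PySem.Dict String (List String)),
      pvINV G rk base sub st → pvLoopA base f st sub = some r →
      r = pvReachAlt base st sub := by
  intro f
  induction f with
  | zero => intro st sub r _ h; cases h
  | succ g ih =>
    intro st sub r hI hA
    cases st with
    | nil =>
      simp only [pvLoopA, Option.some.injEq] at hA
      rw [← hA, pvReachAlt_nil]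
    | cons v st' =>
      cases hget : base.get? v with
      | none =>
        simp only [pvLoopA, hget] at hA
        have hI' : pvINV G rk base sub st' :=
          ⟨hI.1, hI.2.1, fun x hx => hI.2.2.1 x (List.mem_cons_of_mem _ hx),
            pvRINV_pop_none rk base sub v st' hget hI.2.2.2⟩
        rw [ih st' sub r hI' hA]
        by_cases hc : sub.contains v = true
        · rw [pvReachAlt_cons_visited base v st' sub hc]
        · rw [pvReachAlt_cons_none base v st' sub (by simpa using hc) hget]
      | some ts =>
        simp only [pvLoopA, hget] at hA
        rw [pvPush_eq] at hA
        by_cases hc : sub.contains v = true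
        · -- already recorded: A re-pushes but changes nothing; B skips
          obtain ⟨ts', hget'⟩ := pvGet?_of_contains sub v hc
          have hb := hI.2.1 v ts' hget'
          rw [hget] at hb
          obtain rfl := Option.some.inj hb
          rw [pvInsert_self sub v ts hI.1 hget'] at hA
          have hI' : pvINV G rk base sub (ts.reverse ++ st') :=
            pvINV_push_visited G rk base sub v ts st' hGcl hEdge hget hc hI
          rw [ih _ sub r hI' hA]
          rw [pvReachAlt_skip base ts.reverse st' sub
            (fun x hx => pvClosure_at_pop rk base sub v ts st' hget' hI.2.2.2 x
              (List.mem_reverse.mp hx))]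
          rw [pvReachAlt_cons_visited base v st' sub hc]
        · -- fresh: both loops take the identical step
          have hI' : pvINV G rk base (sub.insert v ts) (ts.reverse ++ st') :=
            pvINV_push_fresh G rk base sub v ts st' hGcl hEdge hget
              (by simpa using hc) hI
          rw [ih _ _ r hI' hA]
          rw [pvReachAlt_cons_some base v ts st' sub (by simpa using hc) hget]

-- ----- fuel adequacy for A under Pre_ -----
def pvMu (base : PySem.Dict String (List String)) (rk : String → Nat)
    (st : List String) : Nat :=
  (st.map (fun x => (pvTotTargets base.items + 2) ^ (rk x))).sum

theorem pvMu_append (base : PySem.Dict String (List String)) (rk : String → Nat)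
    (a b : List String) : pvMu base rk (a ++ b) = pvMu base rk a + pvMu base rk b := by
  unfold pvMu; rw [List.map_append, List.sum_append]

theorem pvMu_push_lt (base : PySem.Dict String (List String)) (rk : String → Nat)
    (v : String) (ts : List String) (st : List String)
    (hget : base.get? v = some ts)
    (hdec : ∀ t ∈ ts, rk t < rk v) (hpos : 1 ≤ rk v) :
    pvMu base rk (ts.reverse ++ st) < pvMu base rk (v :: st) := by
  have hlen : ts.length ≤ pvTotTargets base.items := pvTargets_le_tot base v ts hget
  set K := pvTotTargets base.items with hK
  set X := (K + 2) ^ (rk v - 1) with hX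
  have hXpos : 1 ≤ X := Nat.one_le_pow _ _ (by omega)
  have hsum : pvMu base rk ts.reverse ≤ ts.length * X := by
    unfold pvMu
    have hle : ∀ x ∈ ts.reverse.map (fun x => (K + 2) ^ rk x), x ≤ X := by
      intro x hx
      obtain ⟨y, hy, rfl⟩ := List.mem_map.mp hx
      apply Nat.pow_le_pow_right (by omega)
      have := hdec y (List.mem_reverse.mp hy)
      omega
    calc (ts.reverse.map (fun x => (K + 2) ^ rk x)).sum
        ≤ (ts.reverse.map (fun x => (K + 2) ^ rk x)).length • X :=
          List.sum_le_card_nsmul _ _ hle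
      _ = ts.length * X := by simp [smul_eq_mul]
  have hpow : (K + 2) ^ (rk v) = X * (K + 2) := by
    rw [hX]
    conv_lhs => rw [show rk v = (rk v - 1) + 1 by omega]
    rw [pow_succ]
  have hfin : pvMu base rk ts.reverse < (K + 2) ^ (rk v) := by
    have hexp : X * (K + 2) = K * X + 2 * X := by ring
    have h2 : ts.length * X ≤ K * X := Nat.mul_le_mul_right _ hlen
    have h3 : pvMu base rk ts.reverse ≤ K * X := le_trans hsum h2
    omega
  have hcons : pvMu base rk (v :: st) = (K + 2) ^ (rk v) + pvMu base rk st := by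
    unfold pvMu; simp; rw [hK]
  rw [pvMu_append, hcons]
  omega

theorem pvAdequate (base : PySem.Dict String (List String))
    (G : String → Prop) (rk : String → Nat)
    (hGcl : ∀ w, G w → ∀ t ∈ pvTg base w, G t)
    (hEdge : ∀ w, G w → ∀ t ∈ pvTg base w, rk t < rk w)
    (hPos : ∀ x, 1 ≤ rk x) :
    ∀ (f : Nat) (st : List String) (sub : PySem.Dict String (List String)),
      (∀ x ∈ st, G x) → pvMu base rk st < f → (pvLoopA base f st sub).isSome := by
  intro f
  induction f with
  | zero => intro st sub _ h; omega
  | succ g ih =>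
    intro st sub hG h
    cases st with
    | nil => simp [pvLoopA]
    | cons v st' =>
      cases hget : base.get? v with
      | none =>
        simp only [pvLoopA, hget]
        apply ih _ _ (fun x hx => hG x (List.mem_cons_of_mem _ hx))
        have h1 : 1 ≤ (pvTotTargets base.items + 2) ^ (rk v) := Nat.one_le_pow _ _ (by omega)
        unfold pvMu at h ⊢
        simp only [List.map_cons, List.sum_cons] at h
        omega
      | some ts =>
        simp only [pvLoopA, hget]
        rw [pvPush_eq]
        have hGv : G v := hG v List.mem_cons_self
        have htg := pvTg_eq_of_get? base v ts hget
        have hdec : ∀ t ∈ ts, rk t < rk v := fun t ht => hEdge v hGv t (htg ▸ ht)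
        apply ih
        · intro x hx
          rcases List.mem_append.mp hx with hx1 | hx2
          · exact hGcl v hGv x (htg ▸ List.mem_reverse.mp hx1)
          · exact hG x (List.mem_cons_of_mem _ hx2)
        · have := pvMu_push_lt base rk v ts st' hget hdec (hPos v)
          omega

-- fold-with-append is map
theorem pvFoldl_append_map {α β : Type} (l : List α) (f : α → β) :
    l.foldl (fun acc x => acc ++ [f x]) [] = l.map f := by
  have : ∀ (acc : List β), l.foldl (fun acc x => acc ++ [f x]) acc = acc ++ l.map f := by
    induction l with
    | nil => intro acc; simp
    | cons x xs ih => intro acc; simp [ih, List.append_assoc]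
  simpa using this []

-- ===== VERDICT (by name: the statement is the Claim_ definition above) =====
theorem separate_dict_source_targets_spec : Claim_equal_separate_dict_source_targets := by
  intro dst roots _hDom hPre
  unfold Pre_separate_dict_source_targets at hPre
  unfold Spec_separate_dict_source_targets
  unfold separate_dict_source_targets separate_dict_source_targets_alt
  simp only
  rw [pvFoldl_append_map]
  apply List.map_congr_left
  intro r hr
  have hGcl : ∀ w, w ∈ pvReachB (PySem.Dict.mk dst) roots →
      ∀ t ∈ pvTg (PySem.Dict.mk dst) w, t ∈ pvReachB (PySem.Dict.mk dst) roots :=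
    pvReachB_closed (PySem.Dict.mk dst) roots
  have hEdge : ∀ w, w ∈ pvReachB (PySem.Dict.mk dst) roots →
      ∀ t ∈ pvTg (PySem.Dict.mk dst) w,
        pvRk (PySem.Dict.mk dst) t < pvRk (PySem.Dict.mk dst) w :=
    fun w hw t ht => pvRk_edge (PySem.Dict.mk dst) t w ht (hPre w hw t ht)
  have hGr : r ∈ pvReachB (PySem.Dict.mk dst) roots :=
    pvSelf_mem_clos (PySem.Dict.mk dst) roots _ r hr
  have hGst : ∀ x ∈ [r], x ∈ pvReachB (PySem.Dict.mk dst) roots := by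
    intro x hx
    rw [List.mem_singleton] at hx
    exact hx ▸ hGr
  have hmu : pvMu (PySem.Dict.mk dst) (pvRk (PySem.Dict.mk dst)) [r] < pvFuelA dst := by
    unfold pvMu pvFuelA
    simp only [List.map_cons, List.map_nil, List.sum_cons, List.sum_nil, Nat.add_zero]
    have h1 : pvRk (PySem.Dict.mk dst) r ≤ pvTotTargets dst + 1 :=
      pvRk_le (PySem.Dict.mk dst) r
    calc (pvTotTargets dst + 2) ^ pvRk (PySem.Dict.mk dst) r
        ≤ (pvTotTargets dst + 2) ^ (pvTotTargets dst + 1) :=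
          Nat.pow_le_pow_right (by omega) h1
      _ < (pvTotTargets dst + 2) ^ (pvTotTargets dst + 3) :=
          Nat.pow_lt_pow_right (by omega) (by omega)
  have hsome : (pvLoopA (PySem.Dict.mk dst) (pvFuelA dst) [r] PySem.Dict.empty).isSome :=
    pvAdequate (PySem.Dict.mk dst) _ _ hGcl hEdge (pvRk_pos (PySem.Dict.mk dst))
      (pvFuelA dst) [r] PySem.Dict.empty hGst hmu
  obtain ⟨res, hres⟩ := Option.isSome_iff_exists.mp hsome
  have hinv : pvINV (fun x => x ∈ pvReachB (PySem.Dict.mk dst) roots)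
      (pvRk (PySem.Dict.mk dst)) (PySem.Dict.mk dst) PySem.Dict.empty [r] := by
    refine ⟨PySem.Dict.nodup_keys_empty, ?_, hGst, ?_⟩
    · intro k ts h; rw [PySem.Dict.get?_empty] at h; cases h
    · intro k ts t h; rw [PySem.Dict.get?_empty] at h; cases h
  have := pvCorr (PySem.Dict.mk dst) _ _ hGcl hEdge (pvFuelA dst) [r]
    PySem.Dict.empty res hinv hres
  rw [hres]
  simp [this]
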